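-- pv_equiv track=rewrite | github.com/Yeshwanthv123/testpm | backend/load_questions.py | _normalize_role
-- ===== SOURCE A (Python) =====
-- from typing import Dict, Optional, Tuple, List, Set
--
-- _CANON_ROLES = {
--     "APM": {"apm", "associate product manager", "associate pm"},
--     "PM": {"pm", "product manager"},
--     "Senior PM": {"senior pm", "sr pm", "sr. pm", "senior product manager"},
--     "Group PM": {"group pm", "gpm"},
--     "Principal PM": {"principal pm", "pr. pm", "principal product manager"},
--     "Director": {"director", "product director"},
-- }
--
-- def _normalize_role(raw: Optional[str]) -> Optional[str]:
--     if not raw: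
--         return None
--     key = raw.strip().lower()
--     for canon, variants in _CANON_ROLES.items():
--         if key == canon.lower() or key in variants:
--             return canon
--     # If it's already something standard-looking, keep it as-is
--     return raw.strip()
-- ===== SOURCE B (Python) =====
-- from typing import Dict, Optional, Tuple, List, Set
--
-- _CANON_ROLES = {
--     "APM": {"apm", "associate product manager", "associate pm"},
--     "PM": {"pm", "product manager"},
--     "Senior PM": {"senior pm", "sr pm", "sr. pm", "senior product manager"},
--     "Group PM": {"group pm", "gpm"},
--     "Principal PM": {"principal pm", "pr. pm", "principal product manager"},
--     "Director": {"director", "product director"},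
-- }
--
-- # Reverse index built once: every lowercased canonical name and every variant -> canonical form.
-- _REVERSE: Dict[str, str] = {}
-- for _canon, _variants in _CANON_ROLES.items():
--     _REVERSE[_canon.lower()] = _canon
--     for _v in _variants:
--         _REVERSE[_v] = _canon
--
-- def _normalize_role(raw: Optional[str]) -> Optional[str]:
--     if not raw:
--         return None
--     key = raw.strip().lower()
--     return _REVERSE.get(key, raw.strip())
-- ===== Notes on version B (the rewrite author's own statement) =====
-- stated objective: idiomatic
-- what changed: The per-call scan over _CANON_ROLES (membership-testing each role's variant set) is replaced by a reverse-lookup dict built once at module level, so the function body is a single dict .get with the stripped string as fallback.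
import Mathlib
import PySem

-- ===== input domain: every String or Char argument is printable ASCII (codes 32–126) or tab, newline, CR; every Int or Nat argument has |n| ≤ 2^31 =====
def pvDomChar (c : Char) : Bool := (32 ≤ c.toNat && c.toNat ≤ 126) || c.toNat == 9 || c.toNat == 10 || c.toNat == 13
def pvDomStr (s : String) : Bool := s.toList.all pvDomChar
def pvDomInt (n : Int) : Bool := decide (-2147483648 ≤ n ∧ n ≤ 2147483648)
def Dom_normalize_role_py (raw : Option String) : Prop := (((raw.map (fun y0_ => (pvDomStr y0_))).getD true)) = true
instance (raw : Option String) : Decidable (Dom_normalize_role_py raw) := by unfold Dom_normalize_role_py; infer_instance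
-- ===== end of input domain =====

-- B replaces A's per-role scan over _CANON_ROLES with a reverse-lookup dict built once; same return value everywhere.


-- module constant _CANON_ROLES (shared by both ports, as in the Python module)
def canonRoles : List (String × PySem.Set String) :=
  [("APM", PySem.Set.ofList ["apm", "associate product manager", "associate pm"]),
   ("PM", PySem.Set.ofList ["pm", "product manager"]),
   ("Senior PM", PySem.Set.ofList ["senior pm", "sr pm", "sr. pm", "senior product manager"]),
   ("Group PM", PySem.Set.ofList ["group pm", "gpm"]),
   ("Principal PM", PySem.Set.ofList ["principal pm", "pr. pm", "principal product manager"]),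
   ("Director", PySem.Set.ofList ["director", "product director"])]

-- ===== PORT A =====
-- the 'for canon, variants in _CANON_ROLES.items(): if key == canon.lower() or key in variants: return canon' loop
def normRoleLoop (key : String) : List (String × PySem.Set String) → Option String
  | [] => none
  | (canon, variants) :: rest =>
      if key == PySem.Str.lower canon || PySem.Set.contains variants key then some canon
      else normRoleLoop key rest

def normalize_role_py (raw : Option String) : Option String :=
  match raw with
  | none => none
  | some s =>
      if s == "" then none
      else
        let key := PySem.Str.lower (PySem.Str.strip s)
        match normRoleLoop key canonRoles with
        | some canon => some canon
        | none => some (PySem.Str.strip s)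

-- ===== PORT B =====
-- _REVERSE, built once from _CANON_ROLES: canon.lower() and every variant map to canon
def revMap : PySem.Dict String String :=
  canonRoles.foldl
    (fun d cv => cv.2.foldl (fun d v => d.insert v cv.1) (d.insert (PySem.Str.lower cv.1) cv.1))
    PySem.Dict.empty

def normalize_role_py_alt (raw : Option String) : Option String :=
  match raw with
  | none => none
  | some s =>
      if s == "" then none
      else some (revMap.getD (PySem.Str.lower (PySem.Str.strip s)) (PySem.Str.strip s))

-- ===== PRECONDITION & SPEC =====
def Spec_normalize_role_py (raw : Option String) (out : Option String) : Prop := out = normalize_role_py_alt raw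
instance (raw : Option String) (out : Option String) : Decidable (Spec_normalize_role_py raw out) := by unfold Spec_normalize_role_py; infer_instance

-- ===== CLAIM (what is proved, stated in full; the proofs are below) =====
def Claim_equal_normalize_role_py : Prop := ∀ (raw : Option String), Dom_normalize_role_py raw → Spec_normalize_role_py raw (normalize_role_py raw)

-- ===== LEMMAS AND PROOFS =====

-- literal evaluations of canon.lower() and of the variant sets (each a rfl-check)
lemma lowAPM : PySem.Str.lower "APM" = "apm" := rfl
lemma lowPM : PySem.Str.lower "PM" = "pm" := rfl
lemma lowSr : PySem.Str.lower "Senior PM" = "senior pm" := rfl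
lemma lowGp : PySem.Str.lower "Group PM" = "group pm" := rfl
lemma lowPr : PySem.Str.lower "Principal PM" = "principal pm" := rfl
lemma lowDi : PySem.Str.lower "Director" = "director" := rfl
lemma setAPM : PySem.Set.ofList ["apm", "associate product manager", "associate pm"] = ["apm", "associate product manager", "associate pm"] := rfl
lemma setPM : PySem.Set.ofList ["pm", "product manager"] = ["pm", "product manager"] := rfl
lemma setSr : PySem.Set.ofList ["senior pm", "sr pm", "sr. pm", "senior product manager"] = ["senior pm", "sr pm", "sr. pm", "senior product manager"] := rfl
lemma setGp : PySem.Set.ofList ["group pm", "gpm"] = ["group pm", "gpm"] := rfl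
lemma setPr : PySem.Set.ofList ["principal pm", "pr. pm", "principal product manager"] = ["principal pm", "pr. pm", "principal product manager"] := rfl
lemma setDi : PySem.Set.ofList ["director", "product director"] = ["director", "product director"] := rfl

-- A's scan-with-fallback equals B's reverse-dict lookup, for any key and fallback
set_option maxHeartbeats 2000000 in
lemma core (key fb : String) :
    (match normRoleLoop key canonRoles with
     | some canon => some canon
     | none => some fb) = some (revMap.getD key fb) := by
  simp only [canonRoles, revMap, normRoleLoop, List.foldl,
    lowAPM, lowPM, lowSr, lowGp, lowPr, lowDi, setAPM, setPM, setSr, setGp, setPr, setDi,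
    PySem.Dict.getD_insert, PySem.Dict.getD_empty,
    PySem.Set.contains_eq_listContains, List.contains_cons, List.contains_nil,
    Bool.or_eq_true, beq_iff_eq, Bool.or_false]
  by_cases h1 : key = "apm"
  · subst h1; rfl
  by_cases h2 : key = "associate product manager"
  · subst h2; rfl
  by_cases h3 : key = "associate pm"
  · subst h3; rfl
  by_cases h4 : key = "pm"
  · subst h4; rfl
  by_cases h5 : key = "product manager"
  · subst h5; rfl
  by_cases h6 : key = "senior pm"
  · subst h6; rfl
  by_cases h7 : key = "sr pm"
  · subst h7; rfl
  by_cases h8 : key = "sr. pm"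
  · subst h8; rfl
  by_cases h9 : key = "senior product manager"
  · subst h9; rfl
  by_cases h10 : key = "group pm"
  · subst h10; rfl
  by_cases h11 : key = "gpm"
  · subst h11; rfl
  by_cases h12 : key = "principal pm"
  · subst h12; rfl
  by_cases h13 : key = "pr. pm"
  · subst h13; rfl
  by_cases h14 : key = "principal product manager"
  · subst h14; rfl
  by_cases h15 : key = "director"
  · subst h15; rfl
  by_cases h16 : key = "product director"
  · subst h16; rfl
  simp [h1,h2,h3,h4,h5,h6,h7,h8,h9,h10,h11,h12,h13,h14,h15,h16]

-- ===== VERDICT (by name: the statement is the Claim_ definition above) =====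
set_option maxHeartbeats 1000000 in
theorem normalize_role_py_spec : Claim_equal_normalize_role_py := by
  intro raw _
  unfold Spec_normalize_role_py
  cases raw with
  | none => rfl
  | some s =>
      show normalize_role_py (some s) = normalize_role_py_alt (some s)
      simp only [normalize_role_py, normalize_role_py_alt]
      by_cases h : (s == "") = true
      · rw [if_pos h, if_pos h]
      · rw [if_neg h, if_neg h]
        exact core (PySem.Str.lower (PySem.Str.strip s)) (PySem.Str.strip s)
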